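-- pv_equiv track=rewrite | github.com/DPNT-Sourcecode/CHK-berp01 | lib/solutions/CHK/checkout_solution.py | get_basket
-- ===== SOURCE A (Python) =====
-- def get_basket(sku_string):
--     ''' convert a string of SKU_values to a dict item:count '''
--
--     # all the valid items, this would be some kind of database is valid sku lookup function
--     #
--     items_count = {
--         'A': 0,
--         'B': 0,
--         'C': 0,
--         'D': 0,
--         'E': 0,
--         'F': 0,
--         'G': 0,
--         'H': 0,
--         'I': 0,
--         'J': 0,
--         'K': 0,
--         'L': 0,
--         'M': 0,
--         'N': 0,
--         'O': 0,
--         'P': 0,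
--         'Q': 0,
--         'R': 0,
--         'S': 0,
--         'T': 0,
--         'U': 0,
--         'V': 0,
--         'W': 0,
--         'X': 0,
--         'Y': 0,
--         'Z': 0}
--     for item in sku_string:
--         if item not in items_count.keys():
--             return None  # not a valid sku, return
--         items_count[item] = items_count[item] + 1
--     return items_count
-- ===== SOURCE B (Python) =====
-- def get_basket(sku_string):
--     ''' convert a string of SKU_values to a dict item:count '''
--     letters = "ABCDEFGHIJKLMNOPQRSTUVWXYZ"
--     if not set(sku_string) <= set(letters):
--         return None
--     return {c: sum(1 for ch in sku_string if ch == c) for c in letters}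
-- ===== Notes on version B (the rewrite author's own statement) =====
-- stated objective: idiomatic
-- what changed: A makes one incrementing pass over the string with early return from inside the loop; B first validates the whole string by set inclusion, then builds the result with a dict comprehension counting each of the 26 letters by its own scan.
import Mathlib
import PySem

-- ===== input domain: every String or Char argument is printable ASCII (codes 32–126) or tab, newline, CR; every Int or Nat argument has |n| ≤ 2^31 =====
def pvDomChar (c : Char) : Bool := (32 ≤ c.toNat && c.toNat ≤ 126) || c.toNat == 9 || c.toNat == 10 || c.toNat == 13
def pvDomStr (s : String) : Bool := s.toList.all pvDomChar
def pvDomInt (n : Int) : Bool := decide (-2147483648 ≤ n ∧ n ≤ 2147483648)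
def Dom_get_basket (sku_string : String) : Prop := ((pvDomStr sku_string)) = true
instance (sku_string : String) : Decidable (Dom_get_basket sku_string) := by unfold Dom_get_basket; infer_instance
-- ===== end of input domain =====

-- B validates the whole string by set inclusion first and then counts each of the 26 letters with its own scan (dict comprehension), instead of A's single incrementing pass with early return; same return value on every input.


-- ===== PORT A =====
-- the literal dict {'A': 0, …, 'Z': 0}
def getBasketInit : PySem.Dict String Int :=
  PySem.Dict.ofList [("A",0),("B",0),("C",0),("D",0),("E",0),("F",0),("G",0),("H",0),("I",0),
    ("J",0),("K",0),("L",0),("M",0),("N",0),("O",0),("P",0),("Q",0),("R",0),("S",0),("T",0),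
    ("U",0),("V",0),("W",0),("X",0),("Y",0),("Z",0)]

-- the 'for item in sku_string' loop with its early 'return None'
def getBasketLoop : PySem.Dict String Int → List Char → Option (PySem.Dict String Int)
  | d, [] => some d
  | d, c :: rest =>
    let item := String.singleton c
    if d.contains item = false then none        -- 'if item not in items_count.keys(): return None'
    else getBasketLoop (d.insert item (d.getD item 0 + 1)) rest
      -- 'items_count[item] = items_count[item] + 1'; the key is present here, so getD _ 0 is the plain lookup

def get_basket (sku_string : String) : Option (List (String × Int)) :=
  match getBasketLoop getBasketInit sku_string.toList with
  | none => none
  | some d => some d.items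

-- ===== PORT B =====
def pvLetters : List Char := "ABCDEFGHIJKLMNOPQRSTUVWXYZ".toList

def get_basket_alt (sku_string : String) : Option (List (String × Int)) :=
  -- 'if not set(sku_string) <= set(letters): return None'
  if PySem.Set.issubset (PySem.Set.ofList sku_string.toList) (PySem.Set.ofList pvLetters) then
    -- '{c: sum(1 for ch in sku_string if ch == c) for c in letters}'
    some (pvLetters.map (fun c =>
      (String.singleton c, ((sku_string.toList.filter (fun ch => ch == c)).map (fun _ => (1 : Int))).sum)))
  else none

-- ===== PRECONDITION & SPEC =====
def Spec_get_basket (sku_string : String) (out : Option (List (String × Int))) : Prop := out = get_basket_alt sku_string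
instance (sku_string : String) (out : Option (List (String × Int))) : Decidable (Spec_get_basket sku_string out) := by unfold Spec_get_basket; infer_instance

-- ===== CLAIM (what is proved, stated in full; the proofs are below) =====
def Claim_equal_get_basket : Prop := ∀ (sku_string : String), Dom_get_basket sku_string → Spec_get_basket sku_string (get_basket sku_string)

-- ===== LEMMAS AND PROOFS =====

-- a dict whose items are the 26 letters (in order) with values given by f
def mkD (f : Char → Int) : PySem.Dict String Int :=
  PySem.Dict.mk (pvLetters.map (fun c => (String.singleton c, f c)))

theorem singleton_inj {a b : Char} : String.singleton a = String.singleton b ↔ a = b := by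
  constructor
  · intro h
    have := congrArg String.toList h
    simpa [String.singleton] using this
  · intro h; rw [h]

theorem singleton_beq (a b : Char) : (String.singleton a == String.singleton b) = (a == b) := by
  by_cases h : a = b
  · simp [h]
  · simp [h, (singleton_inj (a := a) (b := b)).not.mpr h]

theorem init_eq : getBasketInit = mkD (fun _ => 0) := by decide

theorem items_mkD (f : Char → Int) :
    (mkD f).items = pvLetters.map (fun c => (String.singleton c, f c)) := rfl

theorem nodup_keys_mkD (f : Char → Int) : (mkD f).keys.Nodup := by
  have h1 : (mkD f).keys = pvLetters.map String.singleton := by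
    simp [PySem.Dict.keys, items_mkD]
  rw [h1]
  apply List.Nodup.map
  · intro a b hab; exact singleton_inj.mp hab
  · decide

theorem contains_mkD (f : Char → Int) (c : Char) :
    (mkD f).contains (String.singleton c) = pvLetters.contains c := by
  have h1 : (mkD f).contains (String.singleton c) = pvLetters.any (fun a => a == c) := by
    show (pvLetters.map (fun c => (String.singleton c, f c))).any
      (fun p => p.1 == String.singleton c) = _
    rw [List.any_map]
    congr 1
    funext a
    simp [Function.comp, singleton_beq]
  rw [h1]
  by_cases h : c ∈ pvLetters
  · simp [List.any_eq_true, List.contains_eq_mem, h]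
  · simp only [List.contains_eq_mem, h, decide_false, List.any_eq_false, beq_iff_eq]
    exact fun x hx hxc => h (hxc ▸ hx)

theorem getD_mkD (f : Char → Int) (c : Char) (h : c ∈ pvLetters) :
    (mkD f).getD (String.singleton c) 0 = f c := by
  apply PySem.Dict.getD_of_mem_items (d := mkD f) _ (nodup_keys_mkD f)
  rw [items_mkD]
  exact List.mem_map.mpr ⟨c, h, rfl⟩

theorem insert_mkD (f : Char → Int) (c : Char) (v : Int) (h : c ∈ pvLetters) :
    (mkD f).insert (String.singleton c) v = mkD (fun c' => if c' = c then v else f c') := by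
  apply PySem.Dict.ext
  rw [PySem.Dict.items_insert_of_contains _ v (by rw [contains_mkD]; simpa using h)]
  rw [items_mkD, items_mkD, List.map_map]
  apply List.map_congr_left
  intro a _
  by_cases hac : a = c
  · simp [Function.comp, hac]
  · simp [Function.comp, singleton_beq, hac]

theorem mkD_congr {f g : Char → Int} (h : ∀ c, f c = g c) : mkD f = mkD g := by
  unfold mkD
  apply congrArg
  apply List.map_congr_left
  intro a _
  rw [h a]

theorem loop_spec (cs : List Char) : ∀ f : Char → Int,
    getBasketLoop (mkD f) cs =
      if cs.all (fun c => pvLetters.contains c)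
      then some (mkD (fun c => f c + (cs.count c : Int)))
      else none := by
  induction cs with
  | nil =>
    intro f
    rw [getBasketLoop]
    simp only [List.all_nil, if_true, List.count_nil]
    exact congrArg some (mkD_congr (fun c => by simp)).symm
  | cons c rest ih =>
    intro f
    by_cases hc : c ∈ pvLetters
    · have hcb : pvLetters.contains c = true := by simpa using hc
      rw [getBasketLoop]
      simp only [contains_mkD, hcb, Bool.true_eq_false]
      rw [if_neg (by simp), getD_mkD _ _ hc, insert_mkD _ _ _ hc, ih]
      simp only [List.all_cons, hcb, Bool.true_and]
      by_cases hr : (rest.all fun c => pvLetters.contains c) = true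
      · rw [if_pos hr, if_pos hr]
        refine congrArg some (mkD_congr fun c' => ?_)
        by_cases hc' : c' = c
        · subst hc'
          simp only [List.count_cons_self]
          push_cast
          ring
        · rw [if_neg hc', List.count_cons]
          have hb : (c == c') = false := by
            simp only [beq_eq_false_iff_ne]
            exact fun h => hc' h.symm
          rw [hb]
          simp
      · rw [if_neg hr, if_neg hr]
    · have hcb : pvLetters.contains c = false := by simpa using hc
      rw [getBasketLoop]
      simp [contains_mkD, hc]

theorem sum_ones_eq_count (l : List Char) (c : Char) :
    ((l.filter (fun ch => ch == c)).map (fun _ => (1 : Int))).sum = (l.count c : Int) := by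
  induction l with
  | nil => simp
  | cons a l ih =>
    rw [List.filter_cons, List.count_cons]
    by_cases h : a = c
    · subst h
      rw [if_pos (by simp), List.map_cons, List.sum_cons, ih]
      simp
      omega
    · rw [if_neg (by simp [h]), ih]
      simp [h]

-- ===== VERDICT (by name: the statement is the Claim_ definition above) =====
theorem get_basket_spec : Claim_equal_get_basket := by
  intro s _
  unfold Spec_get_basket get_basket get_basket_alt
  rw [init_eq, loop_spec]
  by_cases hall : s.toList.all (fun c => pvLetters.contains c) = true
  · have hsub : PySem.Set.issubset (PySem.Set.ofList s.toList) (PySem.Set.ofList pvLetters) = true := by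
      rw [PySem.Set.issubset_iff]
      intro x hx
      have hx' : x ∈ s.toList := (PySem.Set.mem_ofList s.toList x).mp hx
      have h2 := List.all_eq_true.mp hall x hx'
      exact (PySem.Set.mem_ofList pvLetters x).mpr (by simpa using h2)
    rw [if_pos hall, if_pos hsub]
    show some (mkD fun c => 0 + (List.count c s.toList : Int)).items = _
    apply congrArg
    rw [items_mkD]
    apply List.map_congr_left
    intro c _
    rw [sum_ones_eq_count]
    simp
  · have hsub : PySem.Set.issubset (PySem.Set.ofList s.toList) (PySem.Set.ofList pvLetters) = false := by
      by_contra hcon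
      apply hall
      have hs := (PySem.Set.issubset_iff (PySem.Set.ofList s.toList) (PySem.Set.ofList pvLetters)).mp
        (by simpa using hcon)
      rw [List.all_eq_true]
      intro x hx
      have h2 := hs x ((PySem.Set.mem_ofList s.toList x).mpr hx)
      simpa using (PySem.Set.mem_ofList pvLetters x).mp h2
    rw [if_neg hall, if_neg (by simp [hsub])]
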